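-- pv_equiv track=rewrite | github.com/mikamerath/PLP | src/utils.py | insert_empty
-- ===== SOURCE A (Python) =====
-- from itertools import chain, combinations
--
-- EMPTY_STRING = 'λ'
--
-- def insert_empty(s, k=1):
--     options = list()
--     e = EMPTY_STRING
--     new = [''] * (len(s) + k)
--     choices = list(range(len(new)))
--     for idxs in combinations(choices, k):
--         j = 0
--         for i in range(len(new)):
--             if i in idxs:
--                 new[i] = e
--             else:
--                 new[i] = s[j]
--                 j += 1
--         options.append(''.join(new))
--     return options
-- ===== SOURCE B (Python) =====
-- EMPTY_STRING = 'λ'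
--
-- def insert_empty(s, k=1):
--     e = EMPTY_STRING
--     def f(s, k):
--         if k == 0:
--             return [s]
--         if not s:
--             return [e * k]
--         return [e + x for x in f(s, k - 1)] + [s[0] + x for x in f(s[1:], k)]
--     return f(s, k)
-- ===== Notes on version B (the rewrite author's own statement) =====
-- stated objective: alternative
-- what changed: Replaced the itertools.combinations-over-positions enumeration with a direct recursion on the string and the remaining empty count (empty-branch first reproduces the lexicographic order).
import Mathlib
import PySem

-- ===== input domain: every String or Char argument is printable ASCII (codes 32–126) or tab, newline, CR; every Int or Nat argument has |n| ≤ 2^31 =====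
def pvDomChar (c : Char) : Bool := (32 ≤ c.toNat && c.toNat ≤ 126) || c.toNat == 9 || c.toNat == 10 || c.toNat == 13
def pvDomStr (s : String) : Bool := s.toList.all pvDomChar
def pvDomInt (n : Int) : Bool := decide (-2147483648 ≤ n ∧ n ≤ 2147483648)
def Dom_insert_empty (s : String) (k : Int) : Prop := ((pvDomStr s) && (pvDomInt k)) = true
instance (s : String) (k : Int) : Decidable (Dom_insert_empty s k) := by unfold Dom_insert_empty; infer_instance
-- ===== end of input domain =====

-- B replaces the itertools.combinations enumeration by a direct recursion on the
-- string and the remaining empty-symbol count (alternative decomposition, same output).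

-- ===== PORT A =====
-- itertools.combinations(l, k) in Python's lexicographic order (over a list of choices)
def pvCombos : List Nat → Nat → List (List Nat)
  | _, 0 => [[]]
  | [], _ + 1 => []
  | x :: xs, k + 1 =>
    -- itertools.combinations yields nothing when r exceeds the pool size ("if r > n: return")
    if (x :: xs).length < k + 1 then []
    else (pvCombos xs k).map (x :: ·) ++ pvCombos xs (k + 1)

-- list(range(i, i+n))
def pvRangeFrom (i n : Nat) : List Nat :=
  match n with
  | 0 => []
  | n + 1 => i :: pvRangeFrom (i + 1) n

-- the inner loop of A: for i in range(len(new)): new[i] = e if i in idxs else s[j]; j += 1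
-- (the running index j into s is transcribed as consuming the prefix of s)
def pvFill (idxs : List Nat) (i rem : Nat) (s : List Char) : List Char :=
  match rem with
  | 0 => []
  | r + 1 =>
    if i ∈ idxs then 'λ' :: pvFill idxs (i + 1) r s
    else s.headD '?' :: pvFill idxs (i + 1) r s.tail

def insert_empty (s : String) (k : Int) : List String :=
  let n := s.toList.length + k.toNat
  (pvCombos (pvRangeFrom 0 n) k.toNat).map (fun idxs => String.mk (pvFill idxs 0 n s.toList))

-- ===== PORT B =====
def pvIns : List Char → Nat → List (List Char)
  | s, 0 => [s]
  | [], k + 1 => [List.replicate (k + 1) 'λ']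
  | c :: cs, k + 1 =>
      (pvIns (c :: cs) k).map ('λ' :: ·) ++ (pvIns cs (k + 1)).map (c :: ·)
  termination_by s k => s.length + k

def insert_empty_alt (s : String) (k : Int) : List String :=
  (pvIns s.toList k.toNat).map String.mk

-- ===== PRECONDITION & SPEC =====
-- Pre_ excludes k < 0, on which Python A raises ValueError (combinations with negative r).
def Pre_insert_empty (s : String) (k : Int) : Prop := 0 ≤ k
instance (s : String) (k : Int) : Decidable (Pre_insert_empty s k) := by unfold Pre_insert_empty; infer_instance
def pvWitness_insert_empty : String × Int := ("ab", 1)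

def Spec_insert_empty (s : String) (k : Int) (out : List String) : Prop := out = insert_empty_alt s k
instance (s : String) (k : Int) (out : List String) : Decidable (Spec_insert_empty s k out) := by unfold Spec_insert_empty; infer_instance

-- ===== CLAIM (what is proved, stated in full; the proofs are below) =====
def Claim_equal_insert_empty : Prop := ∀ (s : String) (k : Int), Dom_insert_empty s k → Pre_insert_empty s k → Spec_insert_empty s k (insert_empty s k)

-- ===== LEMMAS AND PROOFS =====

lemma pvRangeFrom_mem {i n x : Nat} (h : x ∈ pvRangeFrom i n) : i ≤ x := by
  induction n generalizing i with
  | zero => simp [pvRangeFrom] at h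
  | succ n ih =>
    simp [pvRangeFrom] at h
    rcases h with rfl | h
    · exact le_refl _
    · exact Nat.le_of_succ_le (ih h)

lemma pvCombos_mem {l : List Nat} {k : Nat} {idxs : List Nat} (h : idxs ∈ pvCombos l k)
    {x : Nat} (hx : x ∈ idxs) : x ∈ l := by
  induction l generalizing k idxs with
  | nil =>
    cases k with
    | zero => simp [pvCombos] at h; subst h; simp at hx
    | succ k => simp [pvCombos] at h
  | cons a l ih =>
    cases k with
    | zero => simp [pvCombos] at h; subst h; simp at hx
    | succ k =>
      by_cases hlen : (a :: l).length < k + 1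
      · rw [pvCombos, if_pos hlen] at h
        simp at h
      rw [pvCombos, if_neg hlen] at h
      simp at h
      rcases h with ⟨t, ht, rfl⟩ | h
      · rcases List.mem_cons.mp hx with rfl | hx
        · exact List.mem_cons_self
        · exact List.mem_cons_of_mem _ (ih ht hx)
      · exact List.mem_cons_of_mem _ (ih h hx)

lemma pvCombos_short {l : List Nat} {k : Nat} (h : l.length < k) : pvCombos l k = [] := by
  induction l generalizing k with
  | nil =>
    cases k with
    | zero => omega
    | succ k => rfl
  | cons a l ih =>
    cases k with
    | zero => omega
    | succ k =>
      rw [pvCombos, if_pos h]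

-- an index already strictly below the running position never matters again
lemma pvFill_skip {i : Nat} {idxs : List Nat} :
    ∀ (r j : Nat) (s : List Char), i < j → pvFill (i :: idxs) j r s = pvFill idxs j r s := by
  intro r
  induction r with
  | zero => intro j s _; rfl
  | succ r ih =>
    intro j s hij
    have hne : j ≠ i := Nat.ne_of_gt hij
    simp only [pvFill, List.mem_cons, hne, false_or]
    split <;> rw [ih _ _ (Nat.lt_succ_of_lt hij)]

lemma pvFill_nil : ∀ (s : List Char) (i : Nat), pvFill [] i s.length s = s := by
  intro s
  induction s with
  | nil => intro i; rfl
  | cons c cs ih => intro i; simp [pvFill, ih]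

lemma pvRangeFrom_length : ∀ (n i : Nat), (pvRangeFrom i n).length = n := by
  intro n
  induction n with
  | zero => intro i; rfl
  | succ n ih => intro i; simp [pvRangeFrom, ih]

lemma pvMain : ∀ (m : Nat) (s : List Char) (k i : Nat), s.length + k = m →
    (pvCombos (pvRangeFrom i (s.length + k)) k).map (fun idxs => pvFill idxs i (s.length + k) s)
      = pvIns s k := by
  intro m
  induction m using Nat.strong_induction_on with
  | _ m ih =>
    intro s k i hm
    cases k with
    | zero =>
      simp only [Nat.add_zero, pvCombos, List.map_cons, List.map_nil, pvIns]
      rw [pvFill_nil]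
    | succ k =>
      have hn : s.length + (k + 1) = (s.length + k) + 1 := by omega
      rw [hn, pvRangeFrom]
      have hguard : ¬ ((i :: pvRangeFrom (i + 1) (s.length + k)).length < k + 1) := by
        simp [pvRangeFrom_length]
      simp only [pvCombos, hguard, if_false, List.map_append, List.map_map]
      have hfirst :
          (pvCombos (pvRangeFrom (i + 1) (s.length + k)) k).map
              ((fun idxs => pvFill idxs i (s.length + k + 1) s) ∘ (i :: ·))
            = (pvIns s k).map ('λ' :: ·) := by
        rw [← ih (s.length + k) (by omega) s k (i + 1) rfl, List.map_map]
        apply List.map_congr_left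
        intro idxs hidxs
        have hnotlt : ∀ x ∈ idxs, i < x := fun x hx =>
          pvRangeFrom_mem (pvCombos_mem hidxs hx)
        simp only [Function.comp_apply, pvFill, List.mem_cons, true_or, if_true]
        rw [pvFill_skip _ _ _ (Nat.lt_succ_self i)]
      cases s with
      | nil =>
        have hempty : pvCombos (pvRangeFrom (i + 1) k) (k + 1) = [] :=
          pvCombos_short (by rw [pvRangeFrom_length]; omega)
        simp only [List.length_nil, Nat.zero_add] at hfirst hempty ⊢
        rw [hfirst, hempty]
        have : pvIns [] k = [List.replicate k 'λ'] := by
          cases k <;> simp [pvIns]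
        rw [this]
        simp [pvIns, List.replicate]
      | cons c cs =>
        have hsecond :
            (pvCombos (pvRangeFrom (i + 1) ((c :: cs).length + k)) (k + 1)).map
                (fun idxs => pvFill idxs i ((c :: cs).length + k + 1) (c :: cs))
              = (pvIns cs (k + 1)).map (c :: ·) := by
          have hlen : (c :: cs).length + k = cs.length + (k + 1) := by simp; omega
          rw [hlen, ← ih (cs.length + (k + 1)) (by simp [hlen] at hm ⊢; omega) cs (k + 1) (i + 1) rfl,
            List.map_map]
          apply List.map_congr_left
          intro idxs hidxs
          have hnoti : i ∉ idxs := fun hx =>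
            Nat.not_succ_le_self i (Nat.le_of_lt_succ (Nat.lt_succ_of_le (pvRangeFrom_mem (pvCombos_mem hidxs hx))))
          simp only [Function.comp_apply, pvFill, hnoti, if_neg hnoti, if_false]
          have : cs.length + (k + 1) + 1 = (c :: cs).length + k + 1 := by simp; omega
          simp [pvFill, hnoti]
        rw [hfirst, hsecond, pvIns]

-- ===== VERDICT (by name: the statement is the Claim_ definition above) =====
theorem insert_empty_spec : Claim_equal_insert_empty := by
  intro s k _ _
  unfold Spec_insert_empty insert_empty insert_empty_alt
  rw [← pvMain (s.toList.length + k.toNat) s.toList k.toNat 0 rfl, List.map_map]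
  rfl
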